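-- pv_equiv track=rewrite | github.com/edwinSp1/blank-research-repo | learn-ssntorch/create_testcases.py | has_line
-- ===== SOURCE A (Python) =====
-- def has_line(mat):
--     n = len(mat)
--     m = len(mat[0])
--     for row in range(n):
--         # horizontal line is all ones
--         if sum(mat[row]) == m:
--             return True
--
--     for col in range(m):
--         s = 0
--         for row in range(n):
--             s += mat[row][col]
--         # vertical line
--         if s == n:
--             return True
--
--     return False
-- ===== SOURCE B (Python) =====
-- def has_line(mat):
--     n = len(mat)
--     m = len(mat[0])
--     col_sums = [0] * m
--     for row in mat:
--         if sum(row) == m: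
--             return True
--         col_sums = [col_sums[col] + row[col] for col in range(m)]
--     return any(s == n for s in col_sums)
-- ===== Notes on version B (the rewrite author's own statement) =====
-- stated objective: alternative
-- what changed: A makes a row pass and then a nested column-major scan re-indexing the matrix; B makes a single row-major pass that maintains a vector of running column sums and checks it once at the end.
-- outside the precondition, e.g. on has_line([[1, 0], [1], [1, 1]]): A returns True, B raises IndexError
import Mathlib
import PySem

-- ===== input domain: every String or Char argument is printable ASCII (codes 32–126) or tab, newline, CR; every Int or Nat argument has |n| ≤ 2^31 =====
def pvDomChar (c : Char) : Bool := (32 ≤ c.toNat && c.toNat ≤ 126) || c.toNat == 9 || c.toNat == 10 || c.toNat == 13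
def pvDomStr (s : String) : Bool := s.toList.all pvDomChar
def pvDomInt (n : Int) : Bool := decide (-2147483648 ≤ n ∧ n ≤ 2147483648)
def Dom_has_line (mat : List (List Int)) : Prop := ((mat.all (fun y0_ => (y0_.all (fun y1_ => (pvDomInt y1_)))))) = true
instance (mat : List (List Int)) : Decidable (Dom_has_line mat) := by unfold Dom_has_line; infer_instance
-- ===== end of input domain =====

-- B makes one row-major pass maintaining running column sums instead of A's
-- row pass followed by a nested column-major re-scan; same cost, different traversal.

-- ===== PORT A =====
-- literal port of A: row pass with early return, then column-major nested scan
def has_line (mat : List (List Int)) : Bool :=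
  let n : Int := mat.length
  let m : Int := (PySem.List.pyGetD mat 0 []).length
  if (PySem.List.pyRange 0 n 1).any
      (fun row => decide ((PySem.List.pyGetD mat row []).sum = m)) then true
  else if (PySem.List.pyRange 0 m 1).any (fun col =>
      decide ((PySem.List.pyRange 0 n 1).foldl
        (fun s row => s + PySem.List.pyGetD (PySem.List.pyGetD mat row []) col 0) 0 = n))
    then true
  else false

-- ===== PORT B =====
-- the 'for row in mat' loop of Source B with early return and the col_sums accumulator
def hasLineLoop (m n : Int) (rows : List (List Int)) (colSums : List Int) : Bool :=
  match rows with
  | [] => colSums.any (fun s => decide (s = n))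
  | row :: rest =>
    if row.sum = m then true
    else hasLineLoop m n rest
      ((PySem.List.pyRange 0 m 1).map
        (fun col => PySem.List.pyGetD colSums col 0 + PySem.List.pyGetD row col 0))

def has_line_alt (mat : List (List Int)) : Bool :=
  let n : Int := mat.length
  let m : Int := (PySem.List.pyGetD mat 0 []).length
  hasLineLoop m n mat (List.replicate m.toNat 0)

-- ===== PRECONDITION & SPEC =====
-- Pre_ excludes the empty matrix (A raises IndexError on mat[0]) and ragged matrices with a
-- row shorter than the first row: there A either raises IndexError in its column scan or —
-- when some row happens to sum to m — returns True where B's fused scan has already raised.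
def Pre_has_line (mat : List (List Int)) : Prop :=
  mat ≠ [] ∧ ∀ r ∈ mat, (mat.headD []).length ≤ r.length
instance (mat : List (List Int)) : Decidable (Pre_has_line mat) := by
  unfold Pre_has_line; infer_instance
def pvWitness_has_line : List (List Int) := [[1, 0], [0, 1]]

def Spec_has_line (mat : List (List Int)) (out : Bool) : Prop := out = has_line_alt mat
instance (mat : List (List Int)) (out : Bool) : Decidable (Spec_has_line mat out) := by
  unfold Spec_has_line; infer_instance

-- ===== CLAIM (what is proved, stated in full; the proofs are below) =====
def Claim_equal_has_line : Prop :=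
  ∀ (mat : List (List Int)), Dom_has_line mat → Pre_has_line mat →
    Spec_has_line mat (has_line mat)

-- ===== LEMMAS AND PROOFS =====

-- the per-column total, as a plain sum over the rows
def colTotal (rows : List (List Int)) (col : Int) : Int :=
  (rows.map (fun r => PySem.List.pyGetD r col 0)).sum

theorem foldl_add_getD (rows : List (List Int)) (col : Int) (a : Int) :
    rows.foldl (fun s r => s + PySem.List.pyGetD r col 0) a = a + colTotal rows col := by
  induction rows generalizing a with
  | nil => simp [colTotal]
  | cons r rest ih => simp [colTotal, List.foldl_cons, ih, List.map_cons, List.sum_cons]; ring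

theorem pyGetD_replicate_zero (k : Nat) (i : Int) :
    PySem.List.pyGetD (List.replicate k (0 : Int)) i 0 = 0 := by
  unfold PySem.List.pyGetD
  cases h : PySem.List.pyGet? (List.replicate k (0 : Int)) i with
  | none => simp
  | some x =>
    have := PySem.List.mem_of_pyGet?_eq_some _ h
    simp_all [List.eq_of_mem_replicate this]

-- any over a list, with predicates agreeing on members
theorem any_congr_mem {α : Type} (l : List α) (p q : α → Bool)
    (h : ∀ x ∈ l, p x = q x) : l.any p = l.any q := by
  induction l with
  | nil => rfl
  | cons x xs ih => simp_all

theorem ite_ite_or (a b : Bool) :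
    (if a then true else if b then true else false) = (a || b) := by
  cases a <;> cases b <;> simp

-- invariant of hasLineLoop: early row hit, or the accumulated column sums hit n
theorem hasLineLoop_eq (m n : Int) (rows : List (List Int)) (cs : List Int)
    (hm : 0 ≤ m) (hcs : cs.length = m.toNat) :
    hasLineLoop m n rows cs =
      (rows.any (fun r => decide (r.sum = m)) ||
       (PySem.List.pyRange 0 m 1).any
         (fun col => decide (PySem.List.pyGetD cs col 0 + colTotal rows col = n))) := by
  induction rows generalizing cs with
  | nil =>
    have hmap : (PySem.List.pyRange 0 m 1).map (fun col => PySem.List.pyGetD cs col 0) = cs := by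
      have := PySem.List.map_pyGetD_pyRange_zero (xs := cs) (d := (0 : Int))
      simpa [hcs, Int.toNat_of_nonneg hm] using this
    show cs.any (fun s => decide (s = n)) = _
    conv_lhs => rw [← hmap, List.any_map]
    simp only [List.any_nil, Bool.false_or]
    exact any_congr_mem _ _ _ (fun col _ => by simp [Function.comp, colTotal])
  | cons row rest ih =>
    by_cases hrow : row.sum = m
    · simp [hasLineLoop, hrow]
    · have hlen : ((PySem.List.pyRange 0 m 1).map
          (fun col => PySem.List.pyGetD cs col 0 + PySem.List.pyGetD row col 0)).length
          = m.toNat := by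
        simp [PySem.List.length_pyRange_one]
      rw [show hasLineLoop m n (row :: rest) cs = hasLineLoop m n rest
          ((PySem.List.pyRange 0 m 1).map
            (fun col => PySem.List.pyGetD cs col 0 + PySem.List.pyGetD row col 0)) by
          simp [hasLineLoop, hrow]]
      rw [ih _ hlen]
      rw [any_congr_mem (PySem.List.pyRange 0 m 1)
        (fun col => decide (PySem.List.pyGetD ((PySem.List.pyRange 0 m 1).map
            (fun c => PySem.List.pyGetD cs c 0 + PySem.List.pyGetD row c 0)) col 0
            + colTotal rest col = n))
        (fun col => decide (PySem.List.pyGetD cs col 0 + colTotal (row :: rest) col = n))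
        (by
          intro col hcol
          have hb := (PySem.List.mem_pyRange_one).1 hcol
          have hidx := PySem.List.pyGetD_map_pyRange_of_nonneg
            (fun c => PySem.List.pyGetD cs c 0 + PySem.List.pyGetD row c 0) m col 0 hb.1 hb.2
          have hc : colTotal (row :: rest) col
              = PySem.List.pyGetD row col 0 + colTotal rest col := by
            simp [colTotal]
          simp only [hidx, hc]
          rw [add_assoc])]
      simp [hrow]

-- A's two passes, rewritten over the matrix itself
theorem has_line_unfold (mat : List (List Int)) :
    has_line mat =
      (mat.any (fun r => decide (r.sum = ((PySem.List.pyGetD mat 0 []).length : Int))) ||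
       (PySem.List.pyRange 0 ((PySem.List.pyGetD mat 0 []).length : Int) 1).any
         (fun col => decide (colTotal mat col = mat.length))) := by
  unfold has_line
  have h1 : (PySem.List.pyRange 0 (mat.length : Int) 1).any
      (fun row => decide ((PySem.List.pyGetD mat row []).sum
        = ((PySem.List.pyGetD mat 0 []).length : Int)))
      = mat.any (fun r => decide (r.sum = ((PySem.List.pyGetD mat 0 []).length : Int))) := by
    rw [show (PySem.List.pyRange 0 (mat.length : Int) 1).any
        (fun row => decide ((PySem.List.pyGetD mat row []).sum
          = ((PySem.List.pyGetD mat 0 []).length : Int)))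
        = ((PySem.List.pyRange 0 (mat.length : Int) 1).map
            (fun row => PySem.List.pyGetD mat row [])).any
          (fun r => decide (r.sum = ((PySem.List.pyGetD mat 0 []).length : Int))) by
        rw [List.any_map]; rfl]
    rw [PySem.List.map_pyGetD_pyRange_zero' (xs := mat) (d := ([] : List Int))]
  have h2 : ∀ col : Int, (PySem.List.pyRange 0 (mat.length : Int) 1).foldl
      (fun s row => s + PySem.List.pyGetD (PySem.List.pyGetD mat row []) col 0) 0
      = colTotal mat col := by
    intro col
    rw [PySem.List.foldl_pyRange_zero_pyGetD' mat ([] : List Int)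
      (fun s r => s + PySem.List.pyGetD r col 0) 0]
    simpa using foldl_add_getD mat col 0
  simp only [h1, h2]
  exact ite_ite_or _ _

-- ===== VERDICT (by name: the statement is the Claim_ definition above) =====
theorem has_line_spec : Claim_equal_has_line := by
  intro mat _ _
  unfold Spec_has_line has_line_alt
  rw [has_line_unfold]
  rw [hasLineLoop_eq ((PySem.List.pyGetD mat 0 []).length : Int) (mat.length : Int) mat
    (List.replicate ((PySem.List.pyGetD mat 0 []).length : Int).toNat 0)
    (by positivity) (by simp)]
  congr 1
  exact any_congr_mem _ _ _ (fun col _ => by rw [pyGetD_replicate_zero]; simp)
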